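-- pv_equiv track=rewrite | github.com/Tony224x/mastering-believe | domains/algorithmie-python/03-exercises/solutions/01-complexite-big-o.py | process_logs_fixed
-- ===== SOURCE A (Python) =====
-- from collections import defaultdict, Counter
--
-- def process_logs_fixed(logs: list) -> dict:
--     """
--     Fixed version — O(n) time, O(n) space.
--
--     Fixes:
--     1. Use defaultdict(list) instead of string concatenation
--        → Appending to a list is O(1) amortized (vs O(k) string copy)
--     2. Use a set for tracking unique users (not needed here since dict handles it)
--        → O(1) membership test (vs O(k) list scan)
--     """
--     actions_by_user = defaultdict(list)     # O(1) access + O(1) append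
--
--     for log in logs:                        # O(n) iterations
--         user, action = log.split(":", 1)    # split with maxsplit=1 for safety
--         actions_by_user[user].append(action)  # O(1) amortized
--
--     # Filter users with > 1 action — O(n) total across all users
--     return {
--         user: actions
--         for user, actions in actions_by_user.items()
--         if len(actions) > 1                 # O(1) — len() is constant time
--     }
-- ===== SOURCE B (Python) =====
-- from collections import Counter
--
-- def process_logs_fixed(logs: list) -> dict:
--     """Two-phase: parse all logs once, count users, then build only the kept groups."""
--     pairs = [log.split(":", 1) for log in logs]
--     counts = Counter(user for user, _ in pairs)
--     result = {}
--     for user, action in pairs: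
--         if counts[user] > 1:
--             result.setdefault(user, []).append(action)
--     return result
-- ===== Notes on version B (the rewrite author's own statement) =====
-- stated objective: alternative
-- what changed: Instead of grouping everything into a defaultdict and then filtering the finished dict by group size, B parses the logs into pairs once, precomputes per-user occurrence counts with a Counter, and then builds only the surviving groups in a single insertion pass (no post-filter phase).
import Mathlib
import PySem

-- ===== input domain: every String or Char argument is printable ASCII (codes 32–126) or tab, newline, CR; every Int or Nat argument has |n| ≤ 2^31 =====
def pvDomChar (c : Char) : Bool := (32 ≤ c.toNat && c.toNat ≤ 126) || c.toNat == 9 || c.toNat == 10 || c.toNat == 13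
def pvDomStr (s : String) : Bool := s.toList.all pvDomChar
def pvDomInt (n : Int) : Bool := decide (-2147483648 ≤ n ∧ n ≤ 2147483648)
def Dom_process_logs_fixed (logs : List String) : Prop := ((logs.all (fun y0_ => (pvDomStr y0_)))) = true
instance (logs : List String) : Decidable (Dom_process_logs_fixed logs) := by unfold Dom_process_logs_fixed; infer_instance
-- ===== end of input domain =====

-- B replaces A's "group everything, then filter the finished dict" with "count users first, then build
-- only the surviving groups in one insertion pass" — an alternative decomposition, not claimed faster.

-- ===== PORT A =====
-- shared port of the Python line `user, action = log.split(":", 1)`; the fallback arm is unreachable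
-- under Pre_ (on a colon-less log Python raises ValueError at the unpacking, in A and in B alike)
def pvParse (log : String) : String × String :=
  match PySem.Str.splitMax? log ":" 1 with
  | some (u :: a :: _) => (u, a)
  | _ => ("", "")

-- A: defaultdict(list) grouping loop, then the dict comprehension filtering items by group size
-- (keys of the built dict are distinct, so the comprehension is a filter of the items list)
def process_logs_fixed (logs : List String) : List (String × List String) :=
  let actions_by_user : PySem.Dict String (List String) :=
    logs.foldl (fun d log => d.modify (pvParse log).1 [] (· ++ [(pvParse log).2])) PySem.Dict.empty
  actions_by_user.items.filter (fun p => 1 < p.2.length)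

-- ===== PORT B =====
-- B: parse once, Counter of users, then one insertion pass keeping only users with count > 1
-- (`result.setdefault(user, []).append(action)` = insert of the appended list, position kept)
def process_logs_fixed_alt (logs : List String) : List (String × List String) :=
  let pairs := logs.map pvParse
  let counts : PySem.Dict String Int := PySem.Dict.counter (pairs.map (·.1))
  let result : PySem.Dict String (List String) :=
    pairs.foldl (fun r p =>
      if 1 < counts.getD p.1 0 then r.insert p.1 (r.getD p.1 [] ++ [p.2]) else r)
      PySem.Dict.empty
  result.items

-- ===== PRECONDITION & SPEC =====
-- Pre_: every log contains a ':' — on a colon-less log both Pythons raise ValueError at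
-- `user, action = log.split(":", 1)` (A) / the unpacking of the parsed pairs (B).
def Pre_process_logs_fixed (logs : List String) : Prop := ∀ log ∈ logs, ':' ∈ log.toList
instance (logs : List String) : Decidable (Pre_process_logs_fixed logs) := by unfold Pre_process_logs_fixed; infer_instance
def pvWitness_process_logs_fixed : List String := ["alice:login", "alice:logout", "bob:view"]

def Spec_process_logs_fixed (logs : List String) (out : List (String × List String)) : Prop := out = process_logs_fixed_alt logs
instance (logs : List String) (out : List (String × List String)) : Decidable (Spec_process_logs_fixed logs out) := by unfold Spec_process_logs_fixed; infer_instance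

-- ===== CLAIM (what is proved, stated in full; the proofs are below) =====
def Claim_equal_process_logs_fixed : Prop := ∀ (logs : List String), Dom_process_logs_fixed logs → Pre_process_logs_fixed logs → Spec_process_logs_fixed logs (process_logs_fixed logs)

-- ===== LEMMAS AND PROOFS =====

-- the grouping fold's items: one entry per distinct user (first-occurrence order), carrying
-- that user's actions in log order
theorem pv_group_items (pairs : List (String × String)) :
    (pairs.foldl (fun d p => d.modify p.1 [] (· ++ [p.2])) PySem.Dict.empty).items
    = (PySem.Set.ofList (pairs.map (·.1))).map
        (fun k => (k, (pairs.filter (fun p => p.1 == k)).map (·.2))) := by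
  have hnd : (pairs.foldl (fun d p => d.modify p.1 [] (· ++ [p.2])) PySem.Dict.empty).keys.Nodup := by
    apply PySem.Dict.nodup_keys_foldl_modify_key
    simp
  rw [PySem.Dict.items_eq_map_keys _ hnd []]
  rw [PySem.Dict.keys_foldl_modify_key]
  apply List.map_congr_left
  intro k hk
  rw [PySem.Dict.getD_foldl_modify_append]
  simp [PySem.Set.update_nil_left] at hk ⊢

-- first-occurrence dedup commutes with filter
theorem pv_ofList_filter (p : String → Bool) (xs : List String) :
    (PySem.Set.ofList xs).filter p = PySem.Set.ofList (xs.filter p) := by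
  induction xs with
  | nil => rfl
  | cons x xs ih =>
    by_cases h : p x = true
    · simp only [PySem.Set.ofList_cons, List.filter_cons, h, if_pos]
      show x :: (PySem.Set.discard (PySem.Set.ofList xs) x).filter p = _
      rw [show ∀ s : List String, PySem.Set.discard s x = s.filter (fun y => y != x) from fun _ => rfl,
          List.filter_comm, ih]
      rfl
    · simp only [PySem.Set.ofList_cons, List.filter_cons, h]
      show (PySem.Set.discard (PySem.Set.ofList xs) x).filter p = _
      rw [show ∀ s : List String, PySem.Set.discard s x = s.filter (fun y => y != x) from fun _ => rfl,
          List.filter_comm, ih]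
      simp only [Bool.not_eq_true] at h
      rw [List.filter_eq_self.mpr ?_]
      · simp
      intro a ha
      have : a ∈ xs.filter p := by
        rw [PySem.Set.mem_ofList] at ha; exact ha
      simp only [List.mem_filter] at this
      simp only [bne_iff_ne, ne_eq]
      rintro rfl
      rw [h] at this
      exact Bool.false_ne_true this.2

-- core equivalence over the parsed pairs: "group all, filter by size" = "count, build kept groups"
theorem pv_core (pairs : List (String × String)) :
    ((pairs.foldl (fun d p => d.modify p.1 [] (· ++ [p.2])) PySem.Dict.empty).items).filter
        (fun q => 1 < q.2.length)
    = (pairs.foldl (fun r p =>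
          if 1 < (PySem.Dict.counter (pairs.map (·.1))).getD p.1 0 then
            r.insert p.1 (r.getD p.1 [] ++ [p.2])
          else r) PySem.Dict.empty).items := by
  have hstep : (fun (r : PySem.Dict String (List String)) (p : String × String) =>
      if 1 < (PySem.Dict.counter (pairs.map (·.1))).getD p.1 0 then
        r.insert p.1 (r.getD p.1 [] ++ [p.2]) else r)
    = (fun r p => if (fun (p : String × String) => decide (1 < (pairs.map (·.1)).count p.1)) p = true then
        r.modify p.1 [] (· ++ [p.2]) else r) := by
    funext r p
    rw [PySem.Dict.getD_counter]
    simp only [decide_eq_true_eq, Nat.one_lt_cast]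
    rfl
  rw [hstep, ← List.foldl_filter]
  rw [pv_group_items, pv_group_items, List.filter_map]
  have hfm : ((pairs.map (·.1)).filter (fun u => decide (1 < (pairs.map (·.1)).count u)))
      = ((pairs.filter fun p => decide (1 < (pairs.map (·.1)).count p.1)).map (·.1)) := by
    rw [List.filter_map]; rfl
  rw [← hfm, pv_ofList_filter]
  have hpred : ((fun q : String × List String => decide (1 < q.2.length)) ∘ fun k =>
        (k, (pairs.filter (fun p => p.1 == k)).map (·.2)))
      = (fun u => decide (1 < (pairs.map (·.1)).count u)) := by
    funext u
    simp [Function.comp, List.count_eq_countP, List.countP_eq_length_filter, List.filter_map]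
    exact Iff.rfl
  rw [hpred]
  apply List.map_congr_left
  intro k hk
  have hkq : decide (1 < (pairs.map (·.1)).count k) = true := by
    rw [← pv_ofList_filter] at hk
    exact (List.mem_filter.mp hk).2
  rw [List.filter_filter]
  congr 2
  apply List.filter_congr
  intro p _
  by_cases h : p.1 == k
  · have : p.1 = k := by simpa using h
    simp [this, hkq]
  · simp [h]

-- ===== VERDICT (by name: the statement is the Claim_ definition above) =====
theorem process_logs_fixed_spec : Claim_equal_process_logs_fixed := by
  intro logs _ _
  unfold Spec_process_logs_fixed process_logs_fixed process_logs_fixed_alt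
  rw [← pv_core (logs.map pvParse), List.foldl_map]
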